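-- pv_equiv track=rewrite | github.com/JacobCallahan/rizza | rizza/helpers/misc.py | dictionary_exclusion
-- ===== SOURCE A (Python) =====
-- def dictionary_exclusion(indict=None, exclude=None):
--     """Remove any dictionary entries containing the specified string(s)."""
--     if exclude:
--         if not isinstance(exclude, list):
--             exclude = [exclude]
--         for exclusion in exclude:
--             _exclusion = str(exclusion)
--             indict = {
--                 x: y
--                 for x, y in indict.items()
--                 if _exclusion not in str(x) and _exclusion not in str(y)
--             }
--     return indict
-- ===== SOURCE B (Python) =====
-- def dictionary_exclusion(indict=None, exclude=None):
--     """Remove any dictionary entries containing the specified string(s)."""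
--     if not exclude:
--         return indict
--     if not isinstance(exclude, list):
--         exclude = [exclude]
--     exclusions = [str(e) for e in exclude]
--     return {
--         x: y
--         for x, y in indict.items()
--         if all(ex not in str(x) and ex not in str(y) for ex in exclusions)
--     }
-- ===== Notes on version B (the rewrite author's own statement) =====
-- stated objective: simpler
-- what changed: A rebuilds the whole dict once per exclusion string (E full passes); B stringifies the exclusions once and makes a single pass over the items, keeping an entry iff no exclusion occurs in its key or value.
import Mathlib
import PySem

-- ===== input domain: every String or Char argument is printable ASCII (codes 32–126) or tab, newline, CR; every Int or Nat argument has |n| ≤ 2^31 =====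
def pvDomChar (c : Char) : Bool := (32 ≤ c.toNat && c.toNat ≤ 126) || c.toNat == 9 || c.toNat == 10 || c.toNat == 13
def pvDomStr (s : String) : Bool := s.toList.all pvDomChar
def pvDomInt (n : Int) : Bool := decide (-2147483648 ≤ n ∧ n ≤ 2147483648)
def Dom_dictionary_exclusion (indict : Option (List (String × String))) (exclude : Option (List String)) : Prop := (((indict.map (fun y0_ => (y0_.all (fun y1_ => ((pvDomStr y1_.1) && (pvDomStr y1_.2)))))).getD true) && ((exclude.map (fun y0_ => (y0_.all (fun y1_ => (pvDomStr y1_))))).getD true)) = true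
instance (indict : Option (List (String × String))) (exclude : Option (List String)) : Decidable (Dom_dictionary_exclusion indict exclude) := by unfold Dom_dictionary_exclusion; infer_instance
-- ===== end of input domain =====

-- B makes ONE pass over the items with all exclusions checked together, instead of A's
-- one full dict rebuild per exclusion string (objective: simpler). Return value only.

-- ===== PORT A =====
-- for each exclusion, rebuild the dict keeping entries whose key and value avoid it
def dictionary_exclusion (indict : Option (List (String × String))) (exclude : Option (List String)) : Option (List (String × String)) :=
  match exclude with
  | none => indict                     -- 'if exclude:' false
  | some [] => indict                  -- 'if exclude:' false (empty list)
  | some es =>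
    match indict with
    | none => none                     -- Python raises AttributeError here; excluded by Pre_
    | some d =>
      some (es.foldl
        (fun acc exclusion =>
          acc.filter (fun p => !(PySem.Str.isIn exclusion p.1) && !(PySem.Str.isIn exclusion p.2)))
        d)

-- ===== PORT B =====
-- single pass: keep an entry iff every exclusion misses both its key and its value
def dictionary_exclusion_alt (indict : Option (List (String × String))) (exclude : Option (List String)) : Option (List (String × String)) :=
  let es := exclude.getD []            -- 'if not exclude: return indict'
  if es.isEmpty then indict
  else                                  -- on indict = none Python raises AttributeError; excluded by Pre_
    indict.map (fun d =>
      d.filter (fun p =>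
        es.all (fun ex => !(PySem.Str.isIn ex p.1) && !(PySem.Str.isIn ex p.2))))

-- ===== PRECONDITION & SPEC =====
-- Pre_ excludes only inputs where A raises AttributeError: indict = None with a truthy exclude.
def Pre_dictionary_exclusion (indict : Option (List (String × String))) (exclude : Option (List String)) : Prop :=
  indict.isSome = true ∨ exclude.getD [] = []
instance (indict : Option (List (String × String))) (exclude : Option (List String)) : Decidable (Pre_dictionary_exclusion indict exclude) := by unfold Pre_dictionary_exclusion; infer_instance

def pvWitness_dictionary_exclusion : (Option (List (String × String))) × Option (List String) :=
  (some [("abc", "1"), ("xy", "2")], some ["b"])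

def Spec_dictionary_exclusion (indict : Option (List (String × String))) (exclude : Option (List String)) (out : Option (List (String × String))) : Prop := out = dictionary_exclusion_alt indict exclude
instance (indict : Option (List (String × String))) (exclude : Option (List String)) (out : Option (List (String × String))) : Decidable (Spec_dictionary_exclusion indict exclude out) := by unfold Spec_dictionary_exclusion; infer_instance

-- ===== CLAIM (what is proved, stated in full; the proofs are below) =====
def Claim_equal_dictionary_exclusion : Prop := ∀ (indict : Option (List (String × String))) (exclude : Option (List String)), Dom_dictionary_exclusion indict exclude → Pre_dictionary_exclusion indict exclude → Spec_dictionary_exclusion indict exclude (dictionary_exclusion indict exclude)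

-- ===== LEMMAS AND PROOFS =====
-- repeated filtering, one predicate at a time, equals one filter with the conjunction
theorem foldl_filter_eq_filter_all {α β : Type} (q : α → β → Bool) :
    ∀ (es : List α) (d : List β),
      es.foldl (fun acc e => acc.filter (q e)) d
        = d.filter (fun p => es.all (fun e => q e p)) := by
  intro es
  induction es with
  | nil => intro d; simp
  | cons e es ih =>
    intro d
    simp only [List.foldl_cons, ih, List.filter_filter, List.all_cons]
    exact List.filter_congr (by intro p _; exact Bool.and_comm _ _)

-- ===== VERDICT (by name: the statement is the Claim_ definition above) =====
theorem dictionary_exclusion_spec : Claim_equal_dictionary_exclusion := by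
  intro indict exclude _ hpre
  unfold Spec_dictionary_exclusion dictionary_exclusion dictionary_exclusion_alt
  match exclude with
  | none => rfl
  | some [] => rfl
  | some (e :: es) =>
    match indict with
    | none =>
      exfalso
      rcases hpre with h | h
      · simp at h
      · simp at h
    | some d =>
      simp only [Option.getD, List.isEmpty, Option.map, if_neg (by simp : ¬((e :: es).isEmpty = true))]
      exact congrArg some
        (foldl_filter_eq_filter_all
          (fun ex (p : String × String) => !(PySem.Str.isIn ex p.1) && !(PySem.Str.isIn ex p.2))
          (e :: es) d)
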